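-- pv_equiv track=rewrite | github.com/youlingsi/MyPythonChallenge | level14.py | seqGeneraterAl
-- ===== SOURCE A (Python) =====
-- def seqGeneraterAl(l,n):
--     delta = [(1,0), (0,1), (-1, 0), (0, -1)];
--     #Change the delta will change the direaction and start point of the spirl
--
--     sq = [];
--     i = n;
--     j = n;
--     for step in delta:
--         for count in range(l-1):
--             i += step[0];
--             j += step[1];
--             sq += [(i,j)];
--     return sq;
-- ===== SOURCE B (Python) =====
-- def seqGeneraterAl(l, n):
--     m = max(l - 1, 0)
--     right = [(n + k, n) for k in range(1, m + 1)]
--     up    = [(n + m, n + k) for k in range(1, m + 1)]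
--     left  = [(n + m - k, n + m) for k in range(1, m + 1)]
--     down  = [(n, n + m - k) for k in range(1, m + 1)]
--     return right + up + left + down
-- ===== Notes on version B (the rewrite author's own statement) =====
-- stated objective: alternative
-- what changed: Replaces the nested mutating i/j walk over the four deltas by a closed-form construction: each of the four legs is written directly as a list comprehension over range(1, m+1) and the four legs are concatenated.
import Mathlib
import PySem

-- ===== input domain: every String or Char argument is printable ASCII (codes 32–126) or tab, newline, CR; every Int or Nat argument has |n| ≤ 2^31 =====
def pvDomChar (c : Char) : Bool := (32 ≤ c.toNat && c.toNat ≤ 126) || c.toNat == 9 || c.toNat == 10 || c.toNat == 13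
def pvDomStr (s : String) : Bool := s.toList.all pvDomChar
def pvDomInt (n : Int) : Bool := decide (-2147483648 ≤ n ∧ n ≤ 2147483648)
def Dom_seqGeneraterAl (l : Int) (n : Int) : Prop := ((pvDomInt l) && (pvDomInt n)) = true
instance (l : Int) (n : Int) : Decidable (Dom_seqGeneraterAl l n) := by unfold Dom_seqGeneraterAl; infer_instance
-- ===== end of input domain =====

-- B builds the four legs as closed-form comprehensions instead of walking with mutable i/j (alternative decomposition, same cost).

-- ===== PORT A =====
def seqGeneraterAl (l : Int) (n : Int) : List (Int × Int) :=
  let delta : List (Int × Int) := [(1,0), (0,1), (-1,0), (0,-1)]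
  let res := delta.foldl (fun (st : Int × Int × List (Int × Int)) step =>
    (PySem.List.pyRange 0 (l-1) 1).foldl (fun (st2 : Int × Int × List (Int × Int)) _ =>
      let i := st2.1 + step.1
      let j := st2.2.1 + step.2
      (i, j, st2.2.2 ++ [(i, j)])) st) (n, n, ([] : List (Int × Int)))
  res.2.2

-- ===== PORT B =====
def seqGeneraterAl_alt (l : Int) (n : Int) : List (Int × Int) :=
  let m := max (l - 1) 0
  let right := (PySem.List.pyRange 1 (m+1) 1).map (fun k => (n + k, n))
  let up    := (PySem.List.pyRange 1 (m+1) 1).map (fun k => (n + m, n + k))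
  let left  := (PySem.List.pyRange 1 (m+1) 1).map (fun k => (n + m - k, n + m))
  let down  := (PySem.List.pyRange 1 (m+1) 1).map (fun k => (n, n + m - k))
  right ++ up ++ left ++ down

-- ===== PRECONDITION & SPEC =====
def Spec_seqGeneraterAl (l : Int) (n : Int) (out : List (Int × Int)) : Prop := out = seqGeneraterAl_alt l n
instance (l : Int) (n : Int) (out : List (Int × Int)) : Decidable (Spec_seqGeneraterAl l n out) := by unfold Spec_seqGeneraterAl; infer_instance

-- ===== CLAIM (what is proved, stated in full; the proofs are below) =====
def Claim_equal_seqGeneraterAl : Prop := ∀ (l : Int) (n : Int), Dom_seqGeneraterAl l n → Spec_seqGeneraterAl l n (seqGeneraterAl l n)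

-- ===== LEMMAS AND PROOFS =====

-- A's inner loop: folding a leg with fixed delta (dx,dy) from state (i,j,sq)
lemma pvInner (dx dy : Int) (ks : List Int) :
    ∀ (i j : Int) (sq : List (Int × Int)),
    ks.foldl (fun (st2 : Int × Int × List (Int × Int)) _ =>
        (st2.1 + dx, st2.2.1 + dy, st2.2.2 ++ [(st2.1 + dx, st2.2.1 + dy)])) (i, j, sq)
      = (i + ks.length * dx, j + ks.length * dy,
         sq ++ (List.range ks.length).map (fun (k : Nat) => (i + ((k : Int)+1) * dx, j + ((k : Int)+1) * dy))) := by
  induction ks with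
  | nil => intro i j sq; simp
  | cons hd tl ih =>
    intro i j sq
    simp only [List.foldl_cons, ih, List.length_cons]
    refine Prod.ext (by push_cast; ring) (Prod.ext (by push_cast; ring) ?_)
    simp only [List.range_succ_eq_map, List.map_cons, List.map_map,
      List.append_assoc, List.singleton_append]
    congr 2
    · ring
    · apply List.map_congr_left; intro k _
      simp only [Function.comp, Nat.succ_eq_add_one]
      simp only [Prod.mk.injEq]; constructor <;> (push_cast; ring)

-- ===== VERDICT (by name: the statement is the Claim_ definition above) =====
theorem seqGeneraterAl_spec : Claim_equal_seqGeneraterAl := by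
  intro l n _
  unfold Spec_seqGeneraterAl seqGeneraterAl seqGeneraterAl_alt
  simp only [List.foldl_cons, List.foldl_nil, pvInner, PySem.List.length_pyRange_one, sub_zero]
  rw [PySem.List.pyRange_one 1 (max (l-1) 0 + 1)]
  have hM : ((max (l-1) 0 + 1 - 1).toNat) = (l-1).toNat := by omega
  have hcast : ((l-1).toNat : Int) = max (l-1) 0 := Int.ofNat_toNat _
  rw [hM]
  simp only [List.map_map, List.append_assoc, List.nil_append]
  congr 1
  · apply List.map_congr_left; intro k _; simp [Function.comp]; omega
  congr 1
  · apply List.map_congr_left; intro k _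
    simp only [Function.comp, hcast]; simp only [Prod.mk.injEq]; constructor <;> ring
  congr 1
  · apply List.map_congr_left; intro k _
    simp only [Function.comp, hcast]; simp only [Prod.mk.injEq]; constructor <;> ring
  · apply List.map_congr_left; intro k _
    simp only [Function.comp, hcast]; simp only [Prod.mk.injEq]; constructor <;> ring
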